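-- pv_equiv track=rewrite | github.com/joaozeni/yoctooChallenge | ex2/numberStream.py | numberStream
-- ===== SOURCE A (Python) =====
-- def numberStream(input_str):
--     current_value = None
--     count_value = 0
--
--     for value in input_str:
--         if value != current_value:
--             count_value = 1
--             current_value = value
--         else:
--             count_value += 1
--
--         if int(value) == count_value:
--             return True
--
--     return False
-- ===== SOURCE B (Python) =====
-- def numberStream(input_str):
--     rest = input_str
--     while rest:
--         c = rest[0]
--         k = 1
--         while k < len(rest) and rest[k] == c:
--             k += 1
--         if 1 <= int(c) <= k:
--             return True
--         rest = rest[k:]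
--     return False
-- ===== Notes on version B (the rewrite author's own statement) =====
-- stated objective: alternative
-- what changed: B replaces A's per-character counter/state machine with an explicit run-splitting scan: it finds each maximal run of equal characters with an inner scan, range-checks int(c) against the run length (1 <= int(c) <= k), and jumps past the whole run, calling int once per run instead of once per character.
import Mathlib
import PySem

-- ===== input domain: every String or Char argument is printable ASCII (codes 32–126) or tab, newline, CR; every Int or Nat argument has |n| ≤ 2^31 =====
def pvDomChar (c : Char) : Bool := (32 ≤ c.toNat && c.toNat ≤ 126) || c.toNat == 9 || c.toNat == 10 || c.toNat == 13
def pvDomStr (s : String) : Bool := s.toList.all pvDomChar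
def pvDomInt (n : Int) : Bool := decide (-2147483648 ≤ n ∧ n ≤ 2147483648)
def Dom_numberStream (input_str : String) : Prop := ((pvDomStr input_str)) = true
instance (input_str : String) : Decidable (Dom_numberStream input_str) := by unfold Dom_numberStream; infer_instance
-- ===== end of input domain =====

-- B replaces A's per-character run counter with an explicit run-splitting scan: find each
-- maximal run of equal characters and range-check its digit against the run length (alternative decomposition).

-- ===== PORT A =====
-- A's for-loop over the characters with state (current_value, count_value); int(value)
-- raising ValueError is modelled by PySem.Int.ofStr? = none (those inputs are outside Pre_,
-- the port returns false there).
def numberStreamLoop : List Char → Option Char → Int → Bool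
  | [], _, _ => false
  | c :: rest, cur, cnt =>
    let st := if some c ≠ cur then ((1 : Int), some c) else (cnt + 1, cur)
    match PySem.Int.ofStr? (String.mk [c]) with
    | none => false
    | some d => if d = st.1 then true else numberStreamLoop rest st.2 st.1

def numberStream (input_str : String) : Bool :=
  numberStreamLoop input_str.toList none 0

-- ===== PORT B =====
-- Source B's inner while: number of further copies of c at the front of rest (so k = 1 + leadRun c rest)
def leadRun (c : Char) : List Char → Nat
  | [] => 0
  | x :: xs => if x = c then leadRun c xs + 1 else 0

-- Source B's outer while over rest = rest[k:]
def altLoop : List Char → Bool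
  | [] => false
  | c :: rest =>
    let k : Nat := 1 + leadRun c rest
    match PySem.Int.ofStr? (String.mk [c]) with
    | none => false
    | some d => if 1 ≤ d ∧ d ≤ (k : Int) then true else altLoop (rest.drop (leadRun c rest))
  termination_by l => l.length
  decreasing_by
    simp only [List.length_cons, List.length_drop]
    omega

def numberStream_alt (input_str : String) : Bool :=
  altLoop input_str.toList

-- ===== PRECONDITION & SPEC =====
-- Pre_ excludes exactly the inputs on which Python's int(value) raises ValueError before the
-- loop returns: A returns normally iff the string is all digits, or some position i inside an
-- all-digit prefix carries digit d >= 1 preceded (inclusively) by at least d copies of that same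
-- character (then the counter hits d at or before i and A returns True before any non-digit).
def pvIsDigit (c : Char) : Bool := '0' ≤ c && c ≤ '9'
def Pre_numberStream (input_str : String) : Prop :=
  (input_str.toList.all pvIsDigit ||
   (List.range input_str.toList.length).any (fun i =>
     ((List.range (i + 1)).all fun j => pvIsDigit (input_str.toList.getD j ' ')) &&
     (let d := (input_str.toList.getD i ' ').toNat - '0'.toNat
      decide (1 ≤ d) && decide (d ≤ i + 1) &&
      ((List.range (i + 1)).all fun j =>
        decide (j < i + 1 - d) || (input_str.toList.getD j ' ' == input_str.toList.getD i ' ')))))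
  = true
instance (input_str : String) : Decidable (Pre_numberStream input_str) := by
  unfold Pre_numberStream; infer_instance

def pvWitness_numberStream : String := "121"

def Spec_numberStream (input_str : String) (out : Bool) : Prop := out = numberStream_alt input_str
instance (input_str : String) (out : Bool) : Decidable (Spec_numberStream input_str out) := by unfold Spec_numberStream; infer_instance

-- ===== CLAIM (what is proved, stated in full; the proofs are below) =====
def Claim_equal_numberStream : Prop := ∀ (input_str : String), Dom_numberStream input_str → Pre_numberStream input_str → Spec_numberStream input_str (numberStream input_str)

-- ===== LEMMAS AND PROOFS =====

-- Inside a run of c's, A's counter counts cnt+1, cnt+2, …: it fires iff d lands in that window.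
theorem runLemma (rest : List Char) (c : Char) (cnt d : Int)
    (h : PySem.Int.ofStr? (String.mk [c]) = some d) :
    numberStreamLoop rest (some c) cnt =
      (if cnt < d ∧ d ≤ cnt + (leadRun c rest : Int) then true
       else numberStreamLoop (rest.drop (leadRun c rest)) (some c) (cnt + (leadRun c rest : Int))) := by
  induction rest generalizing cnt with
  | nil => simp [numberStreamLoop, leadRun]
  | cons x xs ih =>
    by_cases hx : x = c
    · subst hx
      rw [numberStreamLoop]
      simp only [leadRun, if_true, ne_eq, not_true_eq_false, if_false, h]
      have hcast : (((leadRun x xs) + 1 : Nat) : Int) = (leadRun x xs : Int) + 1 := by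
        push_cast; ring
      rw [hcast]
      by_cases hd : d = cnt + 1
      · subst hd
        rw [if_pos rfl, if_pos ⟨by omega, by omega⟩]
      · rw [if_neg hd, ih (cnt + 1)]
        have hcond : (cnt < d ∧ d ≤ cnt + ((leadRun x xs : Int) + 1)) ↔
            (cnt + 1 < d ∧ d ≤ cnt + 1 + (leadRun x xs : Int)) := by omega
        by_cases hc : cnt + 1 < d ∧ d ≤ cnt + 1 + (leadRun x xs : Int)
        · rw [if_pos hc, if_pos (hcond.mpr hc)]
        · rw [if_neg hc, if_neg (fun hh => hc (hcond.mp hh))]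
          simp only [List.drop_succ_cons]
          congr 1; omega
    · simp only [leadRun, if_neg hx, Nat.cast_zero, add_zero, List.drop_zero]
      rw [if_neg (by omega)]

-- After dropping the leading run of c, the next character differs from c.
theorem head_drop_leadRun (c : Char) : ∀ (l : List Char) (x : Char),
    (l.drop (leadRun c l)).head? = some x → x ≠ c := by
  intro l
  induction l with
  | nil => intro x hx; simp at hx
  | cons y ys ih =>
    intro x hx
    by_cases hy : y = c
    · subst hy
      simp only [leadRun, if_true, List.drop_succ_cons] at hx
      exact ih x hx
    · simp only [leadRun, if_neg hy, List.drop_zero, List.head?_cons, Option.some.injEq] at hx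
      subst hx; exact hy

-- Entering a fresh run (head ≠ current character), A's loop equals B's loop.
theorem loop_eq_alt (l : List Char) (cur : Option Char) (cnt : Int)
    (hcur : ∀ c, l.head? = some c → cur ≠ some c) :
    numberStreamLoop l cur cnt = altLoop l := by
  induction hn : l.length using Nat.strong_induction_on generalizing l cur cnt with
  | _ n ih =>
    subst hn
    cases l with
    | nil => simp [numberStreamLoop, altLoop]
    | cons c rest =>
      have hne : cur ≠ some c := hcur c (by simp)
      rw [numberStreamLoop, altLoop]
      rw [if_pos (fun h : some c = cur => hne h.symm)]
      cases hof : PySem.Int.ofStr? (String.mk [c]) with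
      | none => rfl
      | some d =>
        simp only []
        by_cases hd : d = 1
        · subst hd
          rw [if_pos rfl, if_pos ⟨le_refl 1, by push_cast; omega⟩]
        · rw [if_neg hd, runLemma rest c 1 d hof]
          have hcond : (1 < d ∧ d ≤ 1 + (leadRun c rest : Int)) ↔
              (1 ≤ d ∧ d ≤ ((1 + leadRun c rest : Nat) : Int)) := by push_cast; omega
          by_cases hc : 1 ≤ d ∧ d ≤ ((1 + leadRun c rest : Nat) : Int)
          · rw [if_pos (hcond.mpr hc), if_pos hc]
          · rw [if_neg (fun hh => hc (hcond.mp hh)), if_neg hc]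
            refine ih (rest.drop (leadRun c rest)).length ?_ _ _ _ ?_ rfl
            · simp only [List.length_cons, List.length_drop]; omega
            · intro x hx hxc
              exact head_drop_leadRun c rest x hx (by injection hxc with h; exact h.symm)

-- ===== VERDICT (by name: the statement is the Claim_ definition above) =====
theorem numberStream_spec : Claim_equal_numberStream := by
  intro s _ _
  unfold Spec_numberStream numberStream numberStream_alt
  exact loop_eq_alt s.toList none 0 (fun c _ => by simp)
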